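-- pv_equiv track=rewrite | github.com/kavigupta/neurosym-lib | neurosym/types/type_string_repr.py | lex_type
-- ===== SOURCE A (Python) =====
-- from typing import List, Union
--
-- SPECIAL_CHARS = ["{", "}", "[", "]", "(", ")", "->", ","]
--
-- def lex_type(s: str) -> List[str]:
--     """
--     Lex a type string into tokens.
--     """
--     buf = []
--     for c in s:
--         if c in SPECIAL_CHARS:
--             buf.append(c)
--         elif c == " ":
--             buf.append("")
--         else:
--             if len(buf) > 0 and buf[-1] not in SPECIAL_CHARS:
--                 buf[-1] += c
--             else:
--                 buf.append(c)
--     return [tok for tok in buf if tok != ""]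
-- ===== SOURCE B (Python) =====
-- SPECIAL_CHARS = ["{", "}", "[", "]", "(", ")", "->", ","]
--
-- def lex_type(s: str) -> list:
--     """
--     Lex a type string into tokens.
--     """
--     specials = "{}[](),"
--     tokens = []
--     i, n = 0, len(s)
--     while i < n:
--         c = s[i]
--         if c in specials:
--             tokens.append(c)
--             i += 1
--         elif c == " ":
--             i += 1
--         else:
--             j = i
--             while j < n and s[j] not in specials and s[j] != " ":
--                 j += 1
--             run = s[i:j]
--             while run.startswith("->"):
--                 tokens.append("->")
--                 run = run[2:]
--             if run:
--                 tokens.append(run)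
--             i = j
--     return tokens
-- ===== Notes on version B (the rewrite author's own statement) =====
-- stated objective: faster
-- what changed: Replaces A's char-by-char buffer machine (appending empty strings for spaces, repeatedly re-concatenating the growing last buffer entry, then filtering out empties) with an index-based scanner that emits special characters directly, skips spaces, grabs each maximal ordinary run as one slice, and splits off leading arrow tokens, so no empty tokens are ever created and no final filter pass is needed.
import Mathlib
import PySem

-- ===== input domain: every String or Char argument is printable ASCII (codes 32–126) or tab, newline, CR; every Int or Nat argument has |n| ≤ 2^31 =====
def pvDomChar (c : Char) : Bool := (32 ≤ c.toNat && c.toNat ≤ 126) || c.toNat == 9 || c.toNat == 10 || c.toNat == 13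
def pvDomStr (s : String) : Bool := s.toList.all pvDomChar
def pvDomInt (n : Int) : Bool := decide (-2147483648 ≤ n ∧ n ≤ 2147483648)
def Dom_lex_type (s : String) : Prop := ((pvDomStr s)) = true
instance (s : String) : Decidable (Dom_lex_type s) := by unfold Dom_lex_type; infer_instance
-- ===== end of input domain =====

-- B replaces A's char-by-char buffer machine (mutating the last buffer entry,
-- then filtering out empties) by an index-based run scanner: it emits special
-- chars directly, skips spaces, and takes each maximal ordinary run as one
-- slice, splitting off leading arrow tokens; objective: faster (measured).

-- ===== PORT A =====
-- Tokens are represented as List Char and converted to String at the end;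
-- the final filter `tok != ""` is `t ≠ []` on the representation.
def pvSpecialsA : List (List Char) :=
  [['{'], ['}'], ['['], [']'], ['('], [')'], ['-', '>'], [',']]

def pvStepA (buf : List (List Char)) (c : Char) : List (List Char) :=
  if [c] ∈ pvSpecialsA then buf ++ [[c]]
  else if c = ' ' then buf ++ [[]]
  else
    match buf.getLast? with
    | some t => if t ∉ pvSpecialsA then buf.dropLast ++ [t ++ [c]] else buf ++ [[c]]
    | none => buf ++ [[c]]

def lex_type (s : String) : List String :=
  (((s.toList.foldl pvStepA []).filter (fun t => t ≠ [])).map (fun t => String.mk t))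

-- ===== PORT B =====
def pvIsSpec (c : Char) : Bool := ['{', '}', '[', ']', '(', ')', ','].contains c

def pvOrd (c : Char) : Bool := !(pvIsSpec c) && !(c == ' ')

-- `while run.startswith("->"): emit "->"; run = run[2:]` then emit the rest if nonempty
def pvSplitRun : List Char → List (List Char)
  | '-' :: '>' :: rest => ['-', '>'] :: pvSplitRun rest
  | [] => []
  | run => [run]

def pvLexRuns : List Char → List (List Char)
  | [] => []
  | c :: rest =>
    if pvIsSpec c then [c] :: pvLexRuns rest
    else if c = ' ' then pvLexRuns rest
    else pvSplitRun (c :: rest.takeWhile pvOrd) ++ pvLexRuns (rest.dropWhile pvOrd)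
termination_by l => l.length
decreasing_by
  · simp
  · simp
  · exact Nat.lt_succ_of_le (rest.length_dropWhile_le pvOrd)

def lex_type_alt (s : String) : List String :=
  (pvLexRuns s.toList).map (fun t => String.mk t)

-- ===== PRECONDITION & SPEC =====
def Spec_lex_type (s : String) (out : List String) : Prop := out = lex_type_alt s
instance (s : String) (out : List String) : Decidable (Spec_lex_type s out) := by unfold Spec_lex_type; infer_instance

-- ===== CLAIM (what is proved, stated in full; the proofs are below) =====
def Claim_equal_lex_type : Prop := ∀ (s : String), Dom_lex_type s → Spec_lex_type s (lex_type s)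

-- ===== LEMMAS AND PROOFS =====

-- intermediate machine: A's buffer collapsed to its flushed tokens plus the open token `cur`
def pvGo : List Char → List Char → List (List Char)
  | cur, [] => if cur = [] then [] else [cur]
  | cur, c :: rest =>
    if [c] ∈ pvSpecialsA then (if cur = [] then [] else [cur]) ++ [c] :: pvGo [] rest
    else if c = ' ' then (if cur = [] then [] else [cur]) ++ pvGo [] rest
    else if cur ++ [c] = ['-', '>'] then ['-', '>'] :: pvGo [] rest
    else pvGo (cur ++ [c]) rest

theorem pvMem_specials_iff (c : Char) : ([c] ∈ pvSpecialsA) ↔ pvIsSpec c := by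
  simp [pvSpecialsA, pvIsSpec]

theorem pvConcat_not_special {cur : List Char} {c : Char}
    (h1 : [c] ∉ pvSpecialsA) (h2 : cur ++ [c] ≠ ['-', '>']) : cur ++ [c] ∉ pvSpecialsA := by
  cases cur with
  | nil => simpa using h1
  | cons d ds =>
    intro hmem
    simp only [pvSpecialsA, List.mem_cons, List.not_mem_nil, or_false] at hmem
    rcases hmem with h | h | h | h | h | h | h | h <;>
      first
        | (exact h2 h)
        | (have := congrArg List.length h; simp at this)

theorem pvSplitRun_single {cur : List Char} (h : cur.take 2 ≠ ['-', '>']) :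
    pvSplitRun cur = if cur = [] then [] else [cur] := by
  match cur with
  | [] => rfl
  | [x] => simp [pvSplitRun]
  | x :: y :: t =>
    have hxy : ¬(x = '-' ∧ y = '>') := by
      intro ⟨hx, hy⟩; apply h; simp [hx, hy]
    rcases Decidable.em (x = '-') with hx | hx
    · rcases Decidable.em (y = '>') with hy | hy
      · exact absurd ⟨hx, hy⟩ hxy
      · subst hx; simp [pvSplitRun, hy]
    · simp [pvSplitRun, hx]

theorem pvTake2_append {cur : List Char} {c : Char}
    (h1 : cur.take 2 ≠ ['-', '>']) (h2 : cur ++ [c] ≠ ['-', '>']) :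
    (cur ++ [c]).take 2 ≠ ['-', '>'] := by
  match cur with
  | [] => intro h; have := congrArg List.length h; simp at this
  | [x] => simpa using h2
  | x :: y :: t => simpa using h1

-- A's collapsed machine, started open with token `cur`, is B's run scanner
theorem pvGo_eq_split : ∀ (rest cur : List Char), cur.take 2 ≠ ['-', '>'] →
    pvGo cur rest = pvSplitRun (cur ++ rest.takeWhile pvOrd) ++ pvGo [] (rest.dropWhile pvOrd) := by
  intro rest
  induction rest with
  | nil =>
    intro cur h
    simp [pvGo, pvSplitRun_single h]
  | cons c rs ih =>
    intro cur h
    by_cases ho : pvOrd c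
    · have hns : [c] ∉ pvSpecialsA := by
        rw [pvMem_specials_iff]; simp [pvOrd] at ho; simp [ho.1]
      have hsp : c ≠ ' ' := by simp [pvOrd] at ho; exact ho.2
      rw [List.takeWhile_cons_of_pos ho, List.dropWhile_cons_of_pos ho]
      by_cases hd : cur ++ [c] = ['-', '>']
      · have : cur ++ c :: rs.takeWhile pvOrd = ['-', '>'] ++ rs.takeWhile pvOrd := by
          rw [← hd]; simp
        rw [this]
        simp only [pvGo, if_neg hns, if_neg hsp, if_pos hd]
        rw [ih [] (by simp), List.cons_append]
        simp [pvSplitRun]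
      · have h2 : (cur ++ [c]).take 2 ≠ ['-', '>'] := pvTake2_append h hd
        simp only [pvGo, if_neg hns, if_neg hsp, if_neg hd]
        rw [ih (cur ++ [c]) h2]
        congr 1
        congr 1
        simp
    · have hcur := pvSplitRun_single h
      rw [List.takeWhile_cons_of_neg ho, List.dropWhile_cons_of_neg ho]
      by_cases hs : pvIsSpec c
      · have hm : [c] ∈ pvSpecialsA := (pvMem_specials_iff c).2 hs
        simp [pvGo, hm, hcur]
      · have hsp : c = ' ' := by
          simp [pvOrd, hs] at ho; exact ho
        have hm : [c] ∉ pvSpecialsA := fun hmem => hs ((pvMem_specials_iff c).1 hmem)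
        simp [pvGo, hsp, hcur, show ([' '] : List Char) ∉ pvSpecialsA from by decide]

theorem pvGoNil_eq_lexRuns : ∀ (n : ℕ) (cs : List Char), cs.length ≤ n → pvGo [] cs = pvLexRuns cs := by
  intro n
  induction n with
  | zero =>
    intro cs h
    have : cs = [] := List.eq_nil_of_length_eq_zero (Nat.le_zero.mp h)
    subst this; simp [pvGo, pvLexRuns]
  | succ n ih =>
    intro cs h
    match cs with
    | [] => simp [pvGo, pvLexRuns]
    | c :: rest =>
      have hr : rest.length ≤ n := Nat.le_of_succ_le_succ (by simpa using h)
      by_cases hs : pvIsSpec c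
      · have hm : [c] ∈ pvSpecialsA := (pvMem_specials_iff c).2 hs
        rw [pvLexRuns, if_pos hs,
            show pvGo [] (c :: rest) = [c] :: pvGo [] rest from by simp [pvGo, hm],
            ih rest hr]
      · have hm : [c] ∉ pvSpecialsA := fun m => hs ((pvMem_specials_iff c).1 m)
        by_cases hsp : c = ' '
        · rw [pvLexRuns, if_neg hs, if_pos hsp,
              show pvGo [] (c :: rest) = pvGo [] rest from by simp [pvGo, hsp, show ([' '] : List Char) ∉ pvSpecialsA from by decide],
              ih rest hr]
        · rw [pvLexRuns, if_neg hs, if_neg hsp]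
          have h2 : pvGo [] (c :: rest) = pvGo [c] rest := by
            simp [pvGo, hm, hsp]
          rw [h2, pvGo_eq_split rest [c] (by simp)]
          rw [ih (rest.dropWhile pvOrd) (le_trans (rest.length_dropWhile_le pvOrd) hr)]
          rfl

theorem pvFold (cs : List Char) :
    (∀ done : List (List Char), (∀ t, done.getLast? = some t → t ∈ pvSpecialsA) →
      (List.foldl pvStepA done cs).filter (fun t => t ≠ []) =
        done.filter (fun t => t ≠ []) ++ pvGo [] cs)
    ∧ (∀ (done : List (List Char)) (cur : List Char), cur ∉ pvSpecialsA →
      (List.foldl pvStepA (done ++ [cur]) cs).filter (fun t => t ≠ []) =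
        done.filter (fun t => t ≠ []) ++ pvGo cur cs) := by
  induction cs with
  | nil =>
    constructor
    · intro done _
      simp [pvGo]
    · intro done cur _
      by_cases hcur : cur = [] <;>
        simp [pvGo, hcur, List.filter_append]
  | cons c cs ih =>
    obtain ⟨ihC, ihO⟩ := ih
    have specStep : ∀ buf, [c] ∈ pvSpecialsA → pvStepA buf c = buf ++ [[c]] := by
      intro buf h1; simp [pvStepA, h1]
    constructor
    · -- closed state
      intro done hd
      rw [List.foldl_cons]
      by_cases h1 : [c] ∈ pvSpecialsA
      · rw [specStep done h1,
            ihC (done ++ [[c]]) (by intro t ht; rw [List.getLast?_concat] at ht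
                                    cases ht; exact h1)]
        simp [pvGo, h1, List.filter_append]
      · by_cases h2 : c = ' '
        · have hstep : pvStepA done c = done ++ [[]] := by
            simp [pvStepA, h2, show ([' '] : List Char) ∉ pvSpecialsA from by decide]
          rw [hstep, ihO done [] (by decide)]
          simp [pvGo, h2, show ([' '] : List Char) ∉ pvSpecialsA from by decide]
        · have hstep : pvStepA done c = done ++ [[c]] := by
            simp only [pvStepA, if_neg h1, if_neg h2]
            cases hl : done.getLast? with
            | none => rfl
            | some t => simp [not_not_intro (hd t hl)]
          rw [hstep, ihO done [c] h1]
          simp [pvGo, h1, h2]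
    · -- open state with current token cur
      intro done cur hc
      rw [List.foldl_cons]
      by_cases h1 : [c] ∈ pvSpecialsA
      · rw [specStep _ h1,
            ihC (done ++ [cur] ++ [[c]]) (by intro t ht; rw [List.getLast?_concat] at ht
                                             cases ht; exact h1)]
        by_cases hcur : cur = [] <;>
          simp [pvGo, h1, hcur, List.filter_append]
      · by_cases h2 : c = ' '
        · have hstep : pvStepA (done ++ [cur]) c = (done ++ [cur]) ++ [[]] := by
            simp [pvStepA, h2, show ([' '] : List Char) ∉ pvSpecialsA from by decide]
          rw [hstep, ihO (done ++ [cur]) [] (by decide)]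
          by_cases hcur : cur = [] <;>
            simp [pvGo, h2, hcur, List.filter_append,
                  show ([' '] : List Char) ∉ pvSpecialsA from by decide]
        · have hstep : pvStepA (done ++ [cur]) c = done ++ [cur ++ [c]] := by
            simp only [pvStepA, if_neg h1, if_neg h2, List.getLast?_concat,
                       if_pos hc, List.dropLast_concat]
          rw [hstep]
          by_cases hd : cur ++ [c] = ['-', '>']
          · rw [hd, ihC (done ++ [['-', '>']]) (by intro t ht; rw [List.getLast?_concat] at ht
                                                   cases ht; decide)]
            simp [pvGo, h1, h2, hd, List.filter_append]
          · rw [ihO done (cur ++ [c]) (pvConcat_not_special h1 hd)]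
            simp [pvGo, h1, h2, hd]

-- ===== VERDICT (by name: the statement is the Claim_ definition above) =====
theorem lex_type_spec : Claim_equal_lex_type := by
  intro s _
  unfold Spec_lex_type lex_type lex_type_alt
  rw [(pvFold s.toList).1 [] (by simp), pvGoNil_eq_lexRuns s.toList.length s.toList le_rfl]
  simp
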